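-- pv_equiv track=rewrite | github.com/Sandhyakaruna/Dailypython | ReverseString.py | reverse_sentence_with_spaces
-- ===== SOURCE A (Python) =====
-- def reverse_sentence_with_spaces(sentence):
--     # Convert the sentence into a list to handle spaces
--     sentence_list = list(sentence)
--
--     # Initialize two pointers
--     start = 0
--     end = len(sentence_list) - 1
--
--     # Reverse the characters in the sentence, skipping spaces
--     while start < end:
--         if sentence_list[start] == ' ':
--             start += 1
--         elif sentence_list[end] == ' ':
--             end -= 1
--         else:
--             # Swap characters
--             sentence_list[start], sentence_list[end] = sentence_list[end], sentence_list[start]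
--             start += 1
--             end -= 1
--
--     # Join the list back into a string
--     return ''.join(sentence_list)
-- ===== SOURCE B (Python) =====
-- def reverse_sentence_with_spaces(sentence):
--     # Two-pass: collect the non-space characters reversed, then refill left-to-right.
--     rev = [c for c in sentence if c != ' '][::-1]
--     out = []
--     i = 0
--     for c in sentence:
--         if c == ' ':
--             out.append(c)
--         else:
--             out.append(rev[i])
--             i += 1
--     return ''.join(out)
-- ===== Notes on version B (the rewrite author's own statement) =====
-- stated objective: simpler
-- what changed: Replaces the converging two-pointer in-place swap loop with two passes: collect the non-space characters reversed, then rebuild the string left-to-right refilling non-space slots from that list.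
import Mathlib
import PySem

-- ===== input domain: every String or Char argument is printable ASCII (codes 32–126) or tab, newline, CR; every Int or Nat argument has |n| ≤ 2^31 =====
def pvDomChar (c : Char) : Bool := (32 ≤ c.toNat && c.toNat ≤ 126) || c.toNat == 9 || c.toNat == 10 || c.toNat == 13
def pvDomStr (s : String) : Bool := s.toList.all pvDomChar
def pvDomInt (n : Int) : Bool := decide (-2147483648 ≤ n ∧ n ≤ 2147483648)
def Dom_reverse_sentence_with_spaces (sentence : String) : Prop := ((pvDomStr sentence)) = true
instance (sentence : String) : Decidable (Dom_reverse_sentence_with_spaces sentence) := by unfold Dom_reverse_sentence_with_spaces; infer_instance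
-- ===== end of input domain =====

-- B replaces A's converging two-pointer in-place swap with two passes (collect the
-- non-space characters reversed, then refill left-to-right); same cost, simpler shape.

-- ===== PORT A =====
-- the while loop of A: state is the character list and the two pointers
def pvLoopA (l : List Char) (start e : Int) : List Char :=
  if _h : start < e then
    match PySem.List.pyGet? l start with
    | none => l  -- unreachable: 0 ≤ start < e ≤ len-1 throughout (Python never raises here)
    | some cs =>
      if cs = ' ' then pvLoopA l (start + 1) e
      else
        match PySem.List.pyGet? l e with
        | none => l  -- unreachable, as above
        | some ce =>
          if ce = ' ' then pvLoopA l start (e - 1)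
          else
            pvLoopA (PySem.List.pySetD (PySem.List.pySetD l start ce) e cs) (start + 1) (e - 1)
  else l
termination_by (e - start).toNat
decreasing_by all_goals (simp; omega)

def reverse_sentence_with_spaces (sentence : String) : String :=
  String.mk (pvLoopA sentence.toList 0 ((sentence.toList.length : Int) - 1))

-- ===== PORT B =====
-- the for loop of B: rebuild the string, refilling non-space slots from `rev`
def pvRefillB : List Char → List Char → List Char
  | [], _ => []
  | c :: cs, rev =>
    if c = ' ' then c :: pvRefillB cs rev
    else
      match rev with
      | r :: rs => r :: pvRefillB cs rs
      | [] => []  -- unreachable: rev holds exactly the non-space characters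

def reverse_sentence_with_spaces_alt (sentence : String) : String :=
  String.mk (pvRefillB sentence.toList ((sentence.toList.filter (fun c => c ≠ ' ')).reverse))

-- ===== PRECONDITION & SPEC =====
def Spec_reverse_sentence_with_spaces (sentence : String) (out : String) : Prop := out = reverse_sentence_with_spaces_alt sentence
instance (sentence : String) (out : String) : Decidable (Spec_reverse_sentence_with_spaces sentence out) := by unfold Spec_reverse_sentence_with_spaces; infer_instance

-- ===== CLAIM (what is proved, stated in full; the proofs are below) =====
def Claim_equal_reverse_sentence_with_spaces : Prop := ∀ (sentence : String), Dom_reverse_sentence_with_spaces sentence → Spec_reverse_sentence_with_spaces sentence (reverse_sentence_with_spaces sentence)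

-- ===== LEMMAS AND PROOFS =====

-- A's two-pointer loop, viewed structurally on the active window
def pvG : List Char → List Char
  | [] => []
  | [a] => [a]
  | a :: b :: rest =>
    let t := b :: rest
    let lastc := t.getLast (by simp)
    let m := t.dropLast
    if a = ' ' then a :: pvG t
    else if lastc = ' ' then pvG (a :: m) ++ [lastc]
    else lastc :: pvG m ++ [a]
termination_by w => w.length
decreasing_by all_goals (first | omega | (simp_all; omega) | simp_all)

lemma pvG_nil : pvG [] = [] := by simp [pvG]

lemma pvG_one (a : Char) : pvG [a] = [a] := by simp [pvG]

lemma pvG_two (a b : Char) (m : List Char) :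
    pvG (a :: (m ++ [b])) =
      if a = ' ' then a :: pvG (m ++ [b])
      else if b = ' ' then pvG (a :: m) ++ [b]
      else b :: pvG m ++ [a] := by
  cases m with
  | nil =>
    conv_lhs => rw [pvG.eq_def]
    simp
  | cons x xs =>
    have hDgen : ∀ (ys : List Char) (x : Char), (x :: (ys ++ [b])).dropLast = x :: ys := by
      intro ys
      induction ys with
      | nil => intro x; rfl
      | cons y ys ihy => intro x; simp only [List.cons_append, List.dropLast_cons₂, ihy]
    have hD : (x :: (xs ++ [b])).dropLast = x :: xs := hDgen xs x
    have hL : ∀ (h : x :: (xs ++ [b]) ≠ []), (x :: (xs ++ [b])).getLast h = b := by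
      intro h
      rw [List.getLast_congr _ _ (show x :: (xs ++ [b]) = (x :: xs) ++ [b] by simp)]
      · exact List.getLast_append _
      · simp
    conv_lhs => rw [pvG.eq_def]
    simp [hD, hL]

lemma set_append_middle (pre m post : List Char) (a b u v : Char) :
    ((pre ++ a :: (m ++ b :: post)).set pre.length u).set (pre.length + (m.length + 1)) v
      = pre ++ u :: (m ++ v :: post) := by
  have h1 : (pre ++ a :: (m ++ b :: post)).set pre.length u = pre ++ u :: (m ++ b :: post) := by
    rw [List.set_append_right _ _ (le_refl _)]
    simp
  rw [h1]
  have h2 : pre ++ u :: (m ++ b :: post) = (pre ++ u :: m) ++ b :: post := by simp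
  rw [h2]
  have h3 : pre.length + (m.length + 1) = (pre ++ u :: m).length := by simp
  rw [h3, List.set_append_right _ _ (le_refl _)]
  simp

lemma pvLoopA_window (n : Nat) (w pre post : List Char) (hn : w.length ≤ n) :
    pvLoopA (pre ++ w ++ post) (pre.length : Int) ((pre.length : Int) + w.length - 1)
      = pre ++ pvG w ++ post := by
  induction n generalizing w pre post with
  | zero =>
    cases w with
    | nil =>
      rw [pvLoopA, dif_neg (by simp only [List.length_nil, List.length_cons]; omega)]
      simp [pvG_nil]
    | cons x xs => simp at hn
  | succ n ih =>
    match w with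
    | [] =>
      rw [pvLoopA, dif_neg (by simp only [List.length_nil, List.length_cons]; omega)]
      simp [pvG_nil]
    | [a] =>
      rw [pvLoopA, dif_neg (by simp only [List.length_nil, List.length_cons]; omega)]
      simp [pvG_one]
    | a :: b :: rest =>
      rcases (b :: rest).eq_nil_or_concat with habs | ⟨m, c, hmc⟩
      · simp at habs
      rw [List.concat_eq_append] at hmc
      rw [hmc] at hn ⊢
      have hlen : (a :: (m ++ [c])).length = m.length + 2 := by simp
      have hwn : m.length + 2 ≤ n + 1 := by simpa [hlen] using hn
      have hlt : (pre.length : Int) < (pre.length : Int) + ((a :: (m ++ [c])).length : Int) - 1 := by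
        rw [hlen]; push_cast; omega
      rw [pvLoopA, dif_pos hlt]
      have hgs : PySem.List.pyGet? (pre ++ (a :: (m ++ [c])) ++ post) (pre.length : Int) = some a := by
        rw [show pre ++ (a :: (m ++ [c])) ++ post = pre ++ a :: (m ++ [c] ++ post) by simp]
        exact PySem.List.pyGet?_append_length ..
      have hge : PySem.List.pyGet? (pre ++ (a :: (m ++ [c])) ++ post)
          ((pre.length : Int) + ((a :: (m ++ [c])).length : Int) - 1) = some c := by
        have hsh : pre ++ (a :: (m ++ [c])) ++ post = (pre ++ a :: m) ++ c :: post := by simp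
        have hidx : (pre.length : Int) + ((a :: (m ++ [c])).length : Int) - 1
            = (((pre ++ a :: m).length : Nat) : Int) := by
          simp only [hlen, List.length_append, List.length_cons, List.length_nil]; push_cast; omega
        rw [hsh, hidx]
        exact PySem.List.pyGet?_append_length ..
      split
      · rename_i hnone
        rw [hgs] at hnone; cases hnone
      rename_i cs hcs
      rw [hgs] at hcs
      injection hcs with hcs
      subst hcs
      by_cases ha : a = ' '
      · rw [if_pos ha]
        have hre : pre ++ (a :: (m ++ [c])) ++ post = (pre ++ [a]) ++ (m ++ [c]) ++ post := by simp
        have hidx2 : (pre.length : Int) + ((a :: (m ++ [c])).length : Int) - 1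
            = (((pre ++ [a]).length : Nat) : Int) + ((m ++ [c]).length : Int) - 1 := by
          simp only [hlen, List.length_append, List.length_cons, List.length_nil]; push_cast; omega
        have hidx1 : (pre.length : Int) + 1 = (((pre ++ [a]).length : Nat) : Int) := by
          simp
        rw [hre, hidx2, hidx1, ih (m ++ [c]) (pre ++ [a]) post (by simp; omega)]
        rw [pvG_two, if_pos ha]
        simp
      · rw [if_neg ha]
        split
        · rename_i hnone
          rw [hge] at hnone; cases hnone
        rename_i ce hce
        rw [hge] at hce
        injection hce with hce
        subst hce
        by_cases hc : c = ' '
        · rw [if_pos hc]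
          have hre : pre ++ (a :: (m ++ [c])) ++ post = pre ++ (a :: m) ++ ([c] ++ post) := by simp
          have hidx : (pre.length : Int) + ((a :: (m ++ [c])).length : Int) - 1 - 1
              = (pre.length : Int) + ((a :: m).length : Int) - 1 := by
            simp only [hlen, List.length_append, List.length_cons, List.length_nil]; push_cast; omega
          rw [hre, hidx, ih (a :: m) pre ([c] ++ post) (by simp; omega)]
          rw [pvG_two, if_neg ha, if_pos hc]
          simp
        · rw [if_neg hc]
          have hset : PySem.List.pySetD
              (PySem.List.pySetD (pre ++ (a :: (m ++ [c])) ++ post) (pre.length : Int) c)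
              ((pre.length : Int) + ((a :: (m ++ [c])).length : Int) - 1) a
              = (pre ++ [c]) ++ m ++ ([a] ++ post) := by
            have e1 : PySem.List.pySetD (pre ++ (a :: (m ++ [c])) ++ post) (pre.length : Int) c
                = (pre ++ (a :: (m ++ [c])) ++ post).set pre.length c := by
              simpa using PySem.List.pySetD_natCast (xs := pre ++ (a :: (m ++ [c])) ++ post)
                (n := pre.length) (v := c)
            have hidxn : (pre.length : Int) + ((a :: (m ++ [c])).length : Int) - 1
                = ((pre.length + (m.length + 1) : Nat) : Int) := by
              simp only [hlen]; push_cast; omega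
            rw [e1, hidxn, PySem.List.pySetD_natCast]
            rw [show pre ++ (a :: (m ++ [c])) ++ post = pre ++ a :: (m ++ c :: post) by simp]
            rw [set_append_middle]
            simp
          rw [hset]
          have hidx1 : (pre.length : Int) + 1 = (((pre ++ [c]).length : Nat) : Int) := by simp
          have hidx2 : (pre.length : Int) + ((a :: (m ++ [c])).length : Int) - 1 - 1
              = (((pre ++ [c]).length : Nat) : Int) + (m.length : Int) - 1 := by
            simp only [hlen, List.length_append, List.length_cons, List.length_nil]; push_cast; omega
          rw [hidx1, hidx2, ih m (pre ++ [c]) ([a] ++ post) (by omega)]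
          rw [pvG_two, if_neg ha, if_neg hc]
          simp

-- B's refill splits over an append once the head part has enough fuel in rev
lemma pvRefillB_append (xs ys rev : List Char)
    (h : (xs.filter (fun c => c ≠ ' ')).length ≤ rev.length) :
    pvRefillB (xs ++ ys) rev
      = pvRefillB xs rev ++ pvRefillB ys (rev.drop (xs.filter (fun c => c ≠ ' ')).length) := by
  induction xs generalizing rev with
  | nil => simp [pvRefillB]
  | cons c cs ih =>
    by_cases hc : c = ' '
    · simp only [List.cons_append, pvRefillB, if_pos hc]
      rw [ih rev (by simpa [hc] using h)]
      simp [hc]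
    · have hlen : (cs.filter (fun c => c ≠ ' ')).length + 1 ≤ rev.length := by
        simpa [hc] using h
      match rev with
      | [] => exact absurd hlen (by simp)
      | r :: rs =>
        simp only [List.cons_append, pvRefillB, if_neg hc]
        rw [ih rs (by simpa using hlen)]
        simp [hc]

-- refill never looks past the characters it consumes
lemma pvRefillB_extend (xs rev ext : List Char)
    (h : (xs.filter (fun c => c ≠ ' ')).length ≤ rev.length) :
    pvRefillB xs (rev ++ ext) = pvRefillB xs rev := by
  induction xs generalizing rev with
  | nil => simp [pvRefillB]
  | cons c cs ih =>
    by_cases hc : c = ' '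
    · simp only [pvRefillB, if_pos hc]
      rw [ih rev (by simpa [hc] using h)]
    · have hlen : (cs.filter (fun c => c ≠ ' ')).length + 1 ≤ rev.length := by
        simpa [hc] using h
      match rev with
      | [] => exact absurd hlen (by simp)
      | r :: rs =>
        simp only [List.cons_append, pvRefillB, if_neg hc]
        rw [ih rs (by simpa using hlen)]

lemma pvG_eq_refill (n : Nat) (w : List Char) (hn : w.length ≤ n) :
    pvG w = pvRefillB w ((w.filter (fun c => c ≠ ' ')).reverse) := by
  induction n generalizing w with
  | zero =>
    cases w with
    | nil => simp [pvG_nil, pvRefillB]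
    | cons x xs => simp at hn
  | succ n ih =>
    match w with
    | [] => simp [pvG_nil, pvRefillB]
    | [a] =>
      rw [pvG_one]
      by_cases ha : a = ' ' <;> simp [pvRefillB, ha]
    | a :: b :: rest =>
      rcases (b :: rest).eq_nil_or_concat with habs | ⟨m, c, hmc⟩
      · simp at habs
      rw [List.concat_eq_append] at hmc
      rw [hmc] at hn ⊢
      have hwn : m.length + 2 ≤ n + 1 := by simpa using hn
      rw [pvG_two]
      by_cases ha : a = ' '
      · rw [if_pos ha]
        have hfil : ((a :: (m ++ [c])).filter (fun x => x ≠ ' ')) =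
            ((m ++ [c]).filter (fun x => x ≠ ' ')) := by simp [ha]
        rw [hfil]
        have hh : pvRefillB (a :: (m ++ [c])) (((m ++ [c]).filter (fun x => x ≠ ' ')).reverse)
            = a :: pvRefillB (m ++ [c]) (((m ++ [c]).filter (fun x => x ≠ ' ')).reverse) := by
          simp [pvRefillB, ha]
        rw [hh, ← ih (m ++ [c]) (by simp; omega)]
      · rw [if_neg ha]
        by_cases hc : c = ' '
        · rw [if_pos hc]
          have hfil : ((a :: (m ++ [c])).filter (fun x => x ≠ ' ')) =
              ((a :: m).filter (fun x => x ≠ ' ')) := by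
            subst hc
            rw [show a :: (m ++ [' ']) = (a :: m) ++ [' '] by simp, List.filter_append]
            simp
          rw [hfil]
          have hk : ((a :: m).filter (fun x => x ≠ ' ')).length
              = ((a :: m).filter (fun x => x ≠ ' ')).reverse.length := by simp
          rw [show a :: (m ++ [c]) = (a :: m) ++ [c] by simp]
          rw [pvRefillB_append (a :: m) [c] _ (by rw [hk])]
          rw [← ih (a :: m) (by simp; omega)]
          congr 1
          rw [List.drop_of_length_le (by rw [hk])]
          simp [pvRefillB, hc]
        · rw [if_neg hc]
          have hfil : ((a :: (m ++ [c])).filter (fun x => x ≠ ' ')).reverse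
              = c :: ((m.filter (fun x => x ≠ ' ')).reverse ++ [a]) := by
            simp [ha, hc]
          rw [hfil]
          have hh : pvRefillB (a :: (m ++ [c])) (c :: ((m.filter (fun x => x ≠ ' ')).reverse ++ [a]))
              = c :: pvRefillB (m ++ [c]) ((m.filter (fun x => x ≠ ' ')).reverse ++ [a]) := by
            simp [pvRefillB, ha]
          rw [hh]
          rw [pvRefillB_append m [c] _ (by simp)]
          have hdrop : ((m.filter (fun x => x ≠ ' ')).reverse ++ [a]).drop
              (m.filter (fun x => x ≠ ' ')).length = [a] := by
            rw [show (m.filter (fun x => x ≠ ' ')).length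
                = (m.filter (fun x => x ≠ ' ')).reverse.length by simp]
            exact List.drop_left
          rw [hdrop]
          rw [pvRefillB_extend m _ [a] (by simp)]
          rw [← ih m (by omega)]
          simp [pvRefillB, hc]

-- ===== VERDICT (by name: the statement is the Claim_ definition above) =====
theorem reverse_sentence_with_spaces_spec : Claim_equal_reverse_sentence_with_spaces := by
  intro s _
  unfold Spec_reverse_sentence_with_spaces reverse_sentence_with_spaces reverse_sentence_with_spaces_alt
  have h0 : pvLoopA s.toList 0 ((s.toList.length : Int) - 1)
      = pvLoopA (([] : List Char) ++ s.toList ++ []) ((([] : List Char).length : Nat) : Int)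
          (((([] : List Char).length : Nat) : Int) + s.toList.length - 1) := by
    simp
  rw [h0, pvLoopA_window s.toList.length s.toList [] [] (le_refl _)]
  rw [pvG_eq_refill s.toList.length s.toList (le_refl _)]
  simp
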